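-- pv_equiv track=rewrite | github.com/hamzak-27/firstcars-demo | enhanced_multi_booking_processor.py | _group_kv_pairs_into_bookings
-- ===== SOURCE A (Python) =====
-- from typing import Dict, List, Optional, Any, Tuple
--
-- def _group_kv_pairs_into_bookings(kv_pairs: List[Dict[str, Any]]) -> List[List[Dict[str, Any]]]:
--     """Group key-value pairs into separate bookings based on patterns"""
--     groups = []
--     current_group = []
--
--     # Simple grouping logic - can be enhanced based on your specific patterns
--     for kv in kv_pairs:
--         key = kv.get('key', '').lower()
--         value = kv.get('value', '')
--
--         # Check if this starts a new booking (e.g., date field, name field)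
--         if any(pattern in key for pattern in ['date', 'name', 'employee']) and current_group:
--             # Start new group
--             groups.append(current_group)
--             current_group = [kv]
--         else:
--             current_group.append(kv)
--
--     # Add the last group
--     if current_group:
--         groups.append(current_group)
--
--     return groups if len(groups) > 1 else [kv_pairs]  # If only one group, return all as single booking
-- ===== SOURCE B (Python) =====
-- def _is_boundary(kv):
--     key = kv.get('key', '').lower()
--     return any(p in key for p in ('date', 'name', 'employee'))
--
--
-- def _group_kv_pairs_into_bookings(kv_pairs):
--     """Group key-value pairs into bookings, building the groups back-to-front."""
--     groups = [[]]
--     for kv in reversed(kv_pairs):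
--         groups[0] = [kv] + groups[0]
--         if _is_boundary(kv):
--             groups = [[]] + groups
--     if not groups[0]:
--         groups = groups[1:]
--     return groups if len(groups) > 1 else [kv_pairs]
-- ===== Notes on version B (the rewrite author's own statement) =====
-- stated objective: alternative
-- what changed: B builds the group list back-to-front with a single reverse traversal (a fold from the right that closes a group whenever it meets a boundary key), instead of A's forward loop carrying a groups/current_group accumulator pair with a final flush.
import Mathlib
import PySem

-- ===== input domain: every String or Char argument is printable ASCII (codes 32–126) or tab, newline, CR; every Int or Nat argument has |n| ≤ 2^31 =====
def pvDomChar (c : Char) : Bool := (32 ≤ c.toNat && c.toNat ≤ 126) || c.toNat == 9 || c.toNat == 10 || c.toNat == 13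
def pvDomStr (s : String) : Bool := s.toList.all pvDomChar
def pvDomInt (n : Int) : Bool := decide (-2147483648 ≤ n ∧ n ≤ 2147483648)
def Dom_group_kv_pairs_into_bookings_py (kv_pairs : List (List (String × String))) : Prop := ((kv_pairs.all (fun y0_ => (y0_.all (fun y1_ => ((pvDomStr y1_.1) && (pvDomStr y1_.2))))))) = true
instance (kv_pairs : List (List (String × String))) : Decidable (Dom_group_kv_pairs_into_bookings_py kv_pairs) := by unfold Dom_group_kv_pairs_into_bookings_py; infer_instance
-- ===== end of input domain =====

-- B replaces A's forward loop with a groups/current accumulator pair by a single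
-- right fold building the groups back-to-front (objective: alternative decomposition).

-- ===== PORT A =====
-- kv.get(k, d): first-match lookup in an association list (the dict convention)
def pvKvGetD (kv : List (String × String)) (k d : String) : String :=
  match kv with
  | [] => d
  | (k', v) :: rest => if k' = k then v else pvKvGetD rest k d

-- the body of A's 'for kv in kv_pairs' loop, state = (groups, current_group)
def pvAStep (st : List (List (List (String × String))) × List (List (String × String)))
    (kv : List (String × String)) :
    List (List (List (String × String))) × List (List (String × String)) :=
  let key := PySem.Str.lower (pvKvGetD kv "key" "")
  let _value := pvKvGetD kv "value" ""
  if (["date", "name", "employee"].any fun p => PySem.Str.isIn p key) && !st.2.isEmpty then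
    (st.1 ++ [st.2], [kv])
  else
    (st.1, st.2 ++ [kv])

def group_kv_pairs_into_bookings_py (kv_pairs : List (List (String × String))) :
    List (List (List (String × String))) :=
  let st := kv_pairs.foldl pvAStep ([], [])
  let groups := if !st.2.isEmpty then st.1 ++ [st.2] else st.1
  if groups.length > 1 then groups else [kv_pairs]

-- ===== PORT B =====
def pvIsBoundary (kv : List (String × String)) : Bool :=
  let key := PySem.Str.lower (pvKvGetD kv "key" "")
  ["date", "name", "employee"].any fun p => PySem.Str.isIn p key

-- one step of B's reversed traversal (a foldr): prepend kv to the front group,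
-- and open a fresh front group when kv is a boundary
def pvBStep (kv : List (String × String)) (acc : List (List (List (String × String)))) :
    List (List (List (String × String))) :=
  match acc with
  | [] => [[kv]]  -- unreachable: the accumulator starts nonempty and stays nonempty
  | g :: rest => if pvIsBoundary kv then [] :: (kv :: g) :: rest else (kv :: g) :: rest

def group_kv_pairs_into_bookings_py_alt (kv_pairs : List (List (String × String))) :
    List (List (List (String × String))) :=
  let gs := kv_pairs.foldr pvBStep [[]]
  let gs2 := match gs with
    | [] :: rest => rest
    | _ => gs
  if gs2.length > 1 then gs2 else [kv_pairs]

-- ===== PRECONDITION & SPEC =====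
def Spec_group_kv_pairs_into_bookings_py (kv_pairs : List (List (String × String))) (out : List (List (List (String × String)))) : Prop := out = group_kv_pairs_into_bookings_py_alt kv_pairs
instance (kv_pairs : List (List (String × String))) (out : List (List (List (String × String)))) : Decidable (Spec_group_kv_pairs_into_bookings_py kv_pairs out) := by unfold Spec_group_kv_pairs_into_bookings_py; infer_instance

-- ===== CLAIM (what is proved, stated in full; the proofs are below) =====
def Claim_equal_group_kv_pairs_into_bookings_py : Prop := ∀ (kv_pairs : List (List (String × String))), Dom_group_kv_pairs_into_bookings_py kv_pairs → Spec_group_kv_pairs_into_bookings_py kv_pairs (group_kv_pairs_into_bookings_py kv_pairs)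

-- ===== LEMMAS AND PROOFS =====

-- merge an in-progress current_group into the front group of a back-to-front result
def pvConsume (cur : List (List (String × String))) (l : List (List (List (String × String)))) :
    List (List (List (String × String))) :=
  match l with
  | [] => [cur]
  | g :: rest => (cur ++ g) :: rest

theorem pvFoldr_ne_nil (xs : List (List (String × String))) :
    xs.foldr pvBStep [[]] ≠ [] := by
  induction xs with
  | nil => simp
  | cons x xs ih =>
    simp only [List.foldr_cons]
    cases h : xs.foldr pvBStep [[]] with
    | nil => simp [pvBStep]
    | cons g rest => simp only [pvBStep]; split <;> simp

theorem pvMain (xs : List (List (String × String))) :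
    ∀ gs cur, cur ≠ [] →
      (if !((xs.foldl pvAStep (gs, cur)).2).isEmpty
        then (xs.foldl pvAStep (gs, cur)).1 ++ [(xs.foldl pvAStep (gs, cur)).2]
        else (xs.foldl pvAStep (gs, cur)).1)
      = gs ++ pvConsume cur (xs.foldr pvBStep [[]]) := by
  induction xs with
  | nil =>
    intro gs cur hcur
    simp [pvConsume, hcur]
  | cons x xs ih =>
    intro gs cur hcur
    have hcur' : cur.isEmpty = false := by simp [hcur]
    have hC := pvFoldr_ne_nil xs
    cases hCeq : xs.foldr pvBStep [[]] with
    | nil => exact absurd hCeq hC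
    | cons g rest =>
      simp only [List.foldl_cons, List.foldr_cons, pvAStep, pvBStep, pvIsBoundary, hcur',
        Bool.not_false, Bool.and_true, hCeq]
      split
      · rw [ih (gs ++ [cur]) [x] (by simp)]
        simp [pvConsume, hCeq]
      · rw [ih gs (cur ++ [x]) (by simp)]
        simp [pvConsume, hCeq]

-- ===== VERDICT (by name: the statement is the Claim_ definition above) =====
theorem group_kv_pairs_into_bookings_py_spec : Claim_equal_group_kv_pairs_into_bookings_py := by
  intro kv_pairs _dom
  unfold Spec_group_kv_pairs_into_bookings_py
  cases kv_pairs with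
  | nil => rfl
  | cons x xs =>
    have hC := pvFoldr_ne_nil xs
    cases hCeq : xs.foldr pvBStep [[]] with
    | nil => exact absurd hCeq hC
    | cons g rest =>
      have h1 : (x :: xs).foldl pvAStep ([], []) = xs.foldl pvAStep ([], [x]) := by
        simp [pvAStep]
      have h2 := pvMain xs [] [x] (by simp)
      rw [hCeq] at h2
      simp only [pvConsume, List.nil_append, List.singleton_append] at h2
      have hA : group_kv_pairs_into_bookings_py (x :: xs)
          = (if ((x :: g) :: rest).length > 1 then (x :: g) :: rest else [x :: xs]) := by
        simp only [group_kv_pairs_into_bookings_py, h1, h2]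
      have hB : group_kv_pairs_into_bookings_py_alt (x :: xs)
          = (if ((x :: g) :: rest).length > 1 then (x :: g) :: rest else [x :: xs]) := by
        simp only [group_kv_pairs_into_bookings_py_alt, List.foldr_cons, hCeq, pvBStep]
        by_cases hb : pvIsBoundary x = true
        · simp [hb]
        · simp only [Bool.not_eq_true] at hb
          simp [hb]
      rw [hA, hB]
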